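-- pv_equiv track=rewrite | github.com/jpdeburgo/25_days_of_code | day1.py | get_appearances
-- ===== SOURCE A (Python) =====
-- def get_appearances(pairs):
--     appearances = {}
--     for num in pairs.get("left"):
--         appearances[num] = 0
--     for num in pairs.get("right"):
--         if num in appearances:
--             appearances[num] += 1
--     return appearances
-- ===== SOURCE B (Python) =====
-- def _bisect_left(a, x):
--     lo, hi = 0, len(a)
--     while lo < hi:
--         mid = (lo + hi) // 2
--         if a[mid] < x:
--             lo = mid + 1
--         else:
--             hi = mid
--     return lo
--
--
-- def _bisect_right(a, x):
--     lo, hi = 0, len(a)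
--     while lo < hi:
--         mid = (lo + hi) // 2
--         if x < a[mid]:
--             hi = mid
--         else:
--             lo = mid + 1
--     return lo
--
--
-- def get_appearances(pairs):
--     srt = sorted(pairs.get("right"))
--     appearances = {}
--     for num in pairs.get("left"):
--         appearances[num] = _bisect_right(srt, num) - _bisect_left(srt, num)
--     return appearances
-- ===== Notes on version B (the rewrite author's own statement) =====
-- stated objective: alternative
-- what changed: B sorts `right` once and answers each `left` value by a hand-written binary search (bisect_right minus bisect_left on the sorted list), replacing A's hash-dict seed-from-left-then-filter-right counting loops entirely.
import Mathlib
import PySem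

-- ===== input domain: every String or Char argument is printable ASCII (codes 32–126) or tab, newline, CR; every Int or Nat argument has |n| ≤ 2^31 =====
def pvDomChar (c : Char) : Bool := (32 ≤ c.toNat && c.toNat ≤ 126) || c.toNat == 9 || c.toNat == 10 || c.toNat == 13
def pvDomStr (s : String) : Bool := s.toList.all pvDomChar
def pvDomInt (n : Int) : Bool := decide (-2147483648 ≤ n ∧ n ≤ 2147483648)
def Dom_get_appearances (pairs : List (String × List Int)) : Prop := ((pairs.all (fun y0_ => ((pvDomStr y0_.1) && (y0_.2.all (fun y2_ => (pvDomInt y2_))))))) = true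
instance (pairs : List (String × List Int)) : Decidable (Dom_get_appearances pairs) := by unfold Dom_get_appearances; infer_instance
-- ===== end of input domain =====

-- B sorts `right` once and answers each `left` value by binary search (bisect_right − bisect_left
-- on the sorted copy) instead of A's dict seed-from-left-then-filter-right counting; alternative algorithm, not faster.

-- ===== PORT A =====
-- A: appearances = {}; for num in left: appearances[num] = 0;
--    for num in right: if num in appearances: appearances[num] += 1; return appearances
def get_appearances (pairs : List (String × List Int)) : List (Int × Int) :=
  match (PySem.Dict.mk pairs).get? "left", (PySem.Dict.mk pairs).get? "right" with
  | some left, some right =>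
    let appearances : PySem.Dict Int Int :=
      left.foldl (fun d num => d.insert num 0) PySem.Dict.empty
    let appearances :=
      right.foldl (fun d num => if d.contains num then d.modify num 0 (· + 1) else d) appearances
    appearances.items
  | _, _ => []  -- unreachable under Pre_ (Python raises TypeError iterating None)

-- ===== PORT B =====
-- _bisect_left: while lo < hi: mid = (lo+hi)//2; if a[mid] < x: lo = mid+1 else: hi = mid; return lo
def bisectLeftB (a : List Int) (x : Int) (lo hi : Nat) : Nat :=
  if h : lo < hi then
    match a[(lo + hi) / 2]? with
    | some y => if y < x then bisectLeftB a x ((lo + hi) / 2 + 1) hi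
                else bisectLeftB a x lo ((lo + hi) / 2)
    | none => lo  -- a[mid] is always in range when 0 ≤ lo < hi ≤ len a
  else lo
termination_by hi - lo
decreasing_by all_goals omega

-- _bisect_right: while lo < hi: mid = (lo+hi)//2; if x < a[mid]: hi = mid else: lo = mid+1; return lo
def bisectRightB (a : List Int) (x : Int) (lo hi : Nat) : Nat :=
  if h : lo < hi then
    match a[(lo + hi) / 2]? with
    | some y => if x < y then bisectRightB a x lo ((lo + hi) / 2)
                else bisectRightB a x ((lo + hi) / 2 + 1) hi
    | none => lo  -- a[mid] is always in range when 0 ≤ lo < hi ≤ len a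
  else lo
termination_by hi - lo
decreasing_by all_goals omega

-- B: srt = sorted(right); appearances = {};
--    for num in left: appearances[num] = _bisect_right(srt,num) - _bisect_left(srt,num); return appearances
def get_appearances_alt (pairs : List (String × List Int)) : List (Int × Int) :=
  match (PySem.Dict.mk pairs).get? "right" with
  | none => []  -- unreachable under Pre_ (Python raises TypeError on sorted(None))
  | some right =>
    let srt := PySem.List.sorted right (fun v => v) false
    match (PySem.Dict.mk pairs).get? "left" with
    | none => []  -- unreachable under Pre_
    | some left =>
      let appearances : PySem.Dict Int Int :=
        left.foldl (fun d num =>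
          d.insert num ((bisectRightB srt num 0 srt.length : Int)
                        - (bisectLeftB srt num 0 srt.length : Int))) PySem.Dict.empty
      appearances.items

-- ===== PRECONDITION & SPEC =====
-- Pre_: both keys "left" and "right" are present; otherwise pairs.get(...) yields None and Python raises TypeError.
def Pre_get_appearances (pairs : List (String × List Int)) : Prop :=
  ((PySem.Dict.mk pairs).get? "left").isSome = true ∧ ((PySem.Dict.mk pairs).get? "right").isSome = true
instance (pairs : List (String × List Int)) : Decidable (Pre_get_appearances pairs) := by unfold Pre_get_appearances; infer_instance
def pvWitness_get_appearances : (List (String × List Int)) := [("left", [1, 2, 2]), ("right", [2, 3, 2, 1])]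

def Spec_get_appearances (pairs : List (String × List Int)) (out : List (Int × Int)) : Prop := out = get_appearances_alt pairs
instance (pairs : List (String × List Int)) (out : List (Int × Int)) : Decidable (Spec_get_appearances pairs out) := by unfold Spec_get_appearances; infer_instance

-- ===== CLAIM (what is proved, stated in full; the proofs are below) =====
def Claim_equal_get_appearances : Prop := ∀ (pairs : List (String × List Int)), Dom_get_appearances pairs → Pre_get_appearances pairs → Spec_get_appearances pairs (get_appearances pairs)

-- ===== LEMMAS AND PROOFS =====

-- B's binary-search loops coincide with PySem's fuel-based bisect loops (same halving, same branches).
theorem bisectLeftB_eq_loop (a : List Int) (x : Int) :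
    ∀ (fuel lo hi : Nat), hi - lo ≤ fuel →
      bisectLeftB a x lo hi = PySem.List.bisectLeftLoop a x fuel lo hi := by
  intro fuel
  induction fuel with
  | zero =>
    intro lo hi h
    rw [bisectLeftB, PySem.List.bisectLeftLoop]
    have : ¬ lo < hi := by omega
    simp [this]
  | succ fuel ih =>
    intro lo hi h
    rw [bisectLeftB, PySem.List.bisectLeftLoop]
    by_cases hlt : lo < hi
    · simp only [hlt, dif_pos, if_pos]
      cases a[(lo + hi) / 2]? with
      | none => rfl
      | some y =>
        by_cases hy : y < x
        · simp only [hy, if_pos]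
          exact ih _ _ (by omega)
        · simp only [hy, if_neg, not_false_iff]
          exact ih _ _ (by omega)
    · simp [hlt]

theorem bisectRightB_eq_loop (a : List Int) (x : Int) :
    ∀ (fuel lo hi : Nat), hi - lo ≤ fuel →
      bisectRightB a x lo hi = PySem.List.bisectRightLoop a x fuel lo hi := by
  intro fuel
  induction fuel with
  | zero =>
    intro lo hi h
    rw [bisectRightB, PySem.List.bisectRightLoop]
    have : ¬ lo < hi := by omega
    simp [this]
  | succ fuel ih =>
    intro lo hi h
    rw [bisectRightB, PySem.List.bisectRightLoop]
    by_cases hlt : lo < hi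
    · simp only [hlt, dif_pos, if_pos]
      cases a[(lo + hi) / 2]? with
      | none => rfl
      | some y =>
        by_cases hy : x < y
        · simp only [hy, if_pos]
          exact ih _ _ (by omega)
        · simp only [hy, if_neg, not_false_iff]
          exact ih _ _ (by omega)
    · simp [hlt]

theorem bisectLeftB_eq (a : List Int) (x : Int) :
    bisectLeftB a x 0 a.length = PySem.List.bisectLeft a x :=
  bisectLeftB_eq_loop a x a.length 0 a.length (by omega)

theorem bisectRightB_eq (a : List Int) (x : Int) :
    bisectRightB a x 0 a.length = PySem.List.bisectRight a x :=
  bisectRightB_eq_loop a x a.length 0 a.length (by omega)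

-- On a sorted list, bisect_right − bisect_left is the multiplicity of x.
theorem bisect_sub_eq_count (s : List Int) (hs : s.Pairwise (· ≤ ·)) (x : Int) :
    (PySem.List.bisectRight s x : Int) - (PySem.List.bisectLeft s x : Int) = (s.count x : Int) := by
  obtain ⟨hL1, hL2, hL3⟩ := PySem.List.bisectLeft_spec s x hs
  obtain ⟨hR1, hR2, hR3⟩ := PySem.List.bisectRight_spec s x hs
  set L := PySem.List.bisectLeft s x with hLdef
  set R := PySem.List.bisectRight s x with hRdef
  have hLR : L ≤ R := by
    by_contra hc
    have hc : R < L := Nat.lt_of_not_le (fun h => hc h)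
    have hRlen : R < s.length := by omega
    have h1 := hL2 R hRlen hc
    have h2 := hR3 R hRlen (le_refl R)
    omega
  have hsplit : s = s.take L ++ ((s.drop L).take (R - L) ++ s.drop R) := by
    have hdd : (s.drop L).drop (R - L) = s.drop R := by
      rw [List.drop_drop]; congr 1; omega
    conv_lhs => rw [← List.take_append_drop L s, ← List.take_append_drop (R - L) (s.drop L)]
    rw [hdd]
  have hc1 : (s.take L).count x = 0 := by
    rw [List.count_eq_zero]
    intro hmem
    obtain ⟨j, hj, hval⟩ := List.mem_iff_getElem.mp hmem
    have hj' : j < s.length := by simp [List.length_take] at hj; omega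
    have hjL : j < L := by simp [List.length_take] at hj; omega
    rw [List.getElem_take] at hval
    have := hL2 j hj' hjL
    omega
  have hc3 : (s.drop R).count x = 0 := by
    rw [List.count_eq_zero]
    intro hmem
    obtain ⟨j, hj, hval⟩ := List.mem_iff_getElem.mp hmem
    have hj' : R + j < s.length := by simp [List.length_drop] at hj; omega
    rw [List.getElem_drop] at hval
    have := hR3 (R + j) hj' (by omega)
    omega
  have hmidlen : ((s.drop L).take (R - L)).length = R - L := by
    simp [List.length_take, List.length_drop]; omega
  have hc2 : ((s.drop L).take (R - L)).count x = R - L := by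
    have hall : ∀ y ∈ (s.drop L).take (R - L), x = y := by
      intro y hmem
      obtain ⟨j, hj, hval⟩ := List.mem_iff_getElem.mp hmem
      have hjlt : j < R - L := by rw [hmidlen] at hj; exact hj
      have hj3 : L + j < s.length := by omega
      rw [List.getElem_take, List.getElem_drop] at hval
      have h1 := hL3 (L + j) hj3 (by omega)
      have h2 := hR2 (L + j) hj3 (by omega)
      omega
    exact (List.count_eq_length.mpr hall).trans hmidlen
  have htot : s.count x = R - L := by
    conv_lhs => rw [hsplit]
    rw [List.count_append, List.count_append, hc1, hc2, hc3]
    omega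
  omega

-- A's first loop: every lookup with default 0 yields 0.
theorem getD_seed_zero (L : List Int) (d : PySem.Dict Int Int)
    (h : ∀ k, d.getD k 0 = 0) (k : Int) :
    (L.foldl (fun d num => d.insert num 0) d).getD k 0 = 0 := by
  induction L generalizing d with
  | nil => exact h k
  | cons n L ih =>
    simp only [List.foldl_cons]
    exact ih _ (fun j => by rw [PySem.Dict.getD_insert]; split <;> simp [h])

-- A's second loop: keys are unchanged.
theorem keys_count_loop (R : List Int) (d : PySem.Dict Int Int) :
    (R.foldl (fun d num => if d.contains num then d.modify num 0 (· + 1) else d) d).keys = d.keys := by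
  induction R generalizing d with
  | nil => rfl
  | cons n R ih =>
    simp only [List.foldl_cons]
    rw [ih]
    split
    · rw [PySem.Dict.keys_modify]
      exact PySem.Dict.keys_insert_of_contains _ _ (by assumption)
    · rfl

-- A's second loop: for a key already present, the value grows by its count in R.
theorem getD_count_loop (R : List Int) (d : PySem.Dict Int Int) (k : Int)
    (hk : d.contains k = true) :
    (R.foldl (fun d num => if d.contains num then d.modify num 0 (· + 1) else d) d).getD k 0
      = d.getD k 0 + R.count k := by
  induction R generalizing d with
  | nil => simp
  | cons n R ih =>
    simp only [List.foldl_cons, List.count_cons]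
    by_cases hkn : k = n
    · subst hkn
      rw [hk] ; simp only [if_true]
      rw [ih _ (by rw [PySem.Dict.contains_modify] ; simp [hk])]
      rw [PySem.Dict.getD_modify_self]
      simp ; ring
    · have hnk : ¬ n = k := fun h => hkn h.symm
      split
      · rw [ih _ (by rw [PySem.Dict.contains_modify] ; simp [hk])]
        rw [PySem.Dict.getD_modify_of_ne _ _ _ hkn]
        simp [hnk]
      · rw [ih _ hk] ; simp [hnk]

-- B's loop: lookup of the built dict — last write wins, and the written value depends only on the key.
theorem getD_project_loop (L : List Int) (f : Int → Int) (d : PySem.Dict Int Int) (k : Int) :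
    (L.foldl (fun r num => r.insert num (f num)) d).getD k 0
      = if k ∈ L then f k else d.getD k 0 := by
  induction L generalizing d with
  | nil => simp
  | cons n L ih =>
    simp only [List.foldl_cons, List.mem_cons]
    rw [ih]
    by_cases hL : k ∈ L
    · simp [hL]
    · rw [PySem.Dict.getD_insert]
      by_cases hkn : k = n <;> simp [hkn, hL]

-- A's result equals a left-indexed insert loop whose value is the count of the key in right.
theorem get_appearances_core (left right : List Int) :
    (right.foldl (fun d num => if d.contains num then d.modify num 0 (· + 1) else d)
        (left.foldl (fun d num => d.insert num 0) PySem.Dict.empty)).items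
    = (left.foldl (fun r num => r.insert num ((right.count num : Int))) PySem.Dict.empty).items := by
  have hndA0 : (left.foldl (fun d num => d.insert num 0)
      (PySem.Dict.empty : PySem.Dict Int Int)).keys.Nodup :=
    PySem.Dict.nodup_keys_foldl_insert _ _ _ PySem.Dict.nodup_keys_empty
  have hndA : (right.foldl (fun d num => if d.contains num then d.modify num 0 (· + 1) else d)
      (left.foldl (fun d num => d.insert num 0) (PySem.Dict.empty : PySem.Dict Int Int))).keys.Nodup := by
    rw [keys_count_loop] ; exact hndA0
  have hndB : (left.foldl (fun r num => r.insert num ((right.count num : Int)))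
      (PySem.Dict.empty : PySem.Dict Int Int)).keys.Nodup :=
    PySem.Dict.nodup_keys_foldl_insert _ _ _ PySem.Dict.nodup_keys_empty
  rw [PySem.Dict.items_eq_map_keys _ hndA 0, PySem.Dict.items_eq_map_keys _ hndB 0,
      keys_count_loop, PySem.Dict.keys_foldl_insert, PySem.Dict.keys_foldl_insert]
  apply List.map_congr_left
  intro k hk
  have hkL : k ∈ left := by
    simpa [PySem.Set.mem_update, PySem.Dict.keys_empty] using hk
  have hcont : (left.foldl (fun d num => d.insert num 0)
      (PySem.Dict.empty : PySem.Dict Int Int)).contains k = true := by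
    rw [PySem.Dict.contains_iff_mem_keys, PySem.Dict.keys_foldl_insert]
    simpa [PySem.Set.mem_update, PySem.Dict.keys_empty] using hkL
  rw [getD_count_loop _ _ _ hcont,
      getD_seed_zero left PySem.Dict.empty (fun j => PySem.Dict.getD_empty _ _) k,
      getD_project_loop left (fun num => (right.count num : Int)), if_pos hkL]
  simp

-- ===== VERDICT (by name: the statement is the Claim_ definition above) =====
theorem get_appearances_spec : Claim_equal_get_appearances := by
  intro pairs _ hpre
  obtain ⟨hl, hr⟩ := hpre
  unfold Spec_get_appearances get_appearances get_appearances_alt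
  obtain ⟨left, hleft⟩ := Option.isSome_iff_exists.mp hl
  obtain ⟨right, hright⟩ := Option.isSome_iff_exists.mp hr
  rw [hleft, hright]
  have hf : (fun (d : PySem.Dict Int Int) (num : Int) =>
      d.insert num ((bisectRightB (PySem.List.sorted right (fun v => v) false) num 0 (PySem.List.sorted right (fun v => v) false).length : Int)
                    - (bisectLeftB (PySem.List.sorted right (fun v => v) false) num 0 (PySem.List.sorted right (fun v => v) false).length : Int)))
      = (fun (d : PySem.Dict Int Int) (num : Int) => d.insert num ((right.count num : Int))) := by
    funext d num
    rw [bisectRightB_eq, bisectLeftB_eq,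
        bisect_sub_eq_count _ (PySem.List.sorted_pairwise right (fun v => v)) num,
        ((PySem.List.sorted_perm right (fun v => v) false).count_eq num)]
  simp only [hf]
  exact get_appearances_core left right
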